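-- pv_equiv track=rewrite | github.com/ragib80/SalesAgent | src/agent/agent.py | extract_filter_and_orderby
-- ===== SOURCE A (Python) =====
-- from typing import Dict, Any, List, Optional
--
-- def extract_filter_and_orderby(odata_query: str) -> tuple[Optional[str], Optional[str]]:
--     """Utility to grab $filter and $orderby parts from a query string."""
--     f, o = None, None
--     for part in odata_query.split("&"):
--         if part.startswith("$filter="):
--             f = part[8:]
--         elif part.startswith("$orderby="):
--             o = part[9:]
--     return f, o
-- ===== SOURCE B (Python) =====
-- def extract_filter_and_orderby(odata_query: str):
--     """Utility to grab $filter and $orderby parts from a query string."""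
--     params = {}
--     for part in odata_query.split("&"):
--         key, sep, value = part.partition("=")
--         if sep:
--             params[key] = value
--     return params.get("$filter"), params.get("$orderby")
-- ===== Notes on version B (the rewrite author's own statement) =====
-- stated objective: idiomatic
-- what changed: Instead of a conditional-assignment pass testing each part against two hard-coded prefixes, B partitions every part at its first '=' into a parameter table (last occurrence wins) and then looks the two keys up.
import Mathlib
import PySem

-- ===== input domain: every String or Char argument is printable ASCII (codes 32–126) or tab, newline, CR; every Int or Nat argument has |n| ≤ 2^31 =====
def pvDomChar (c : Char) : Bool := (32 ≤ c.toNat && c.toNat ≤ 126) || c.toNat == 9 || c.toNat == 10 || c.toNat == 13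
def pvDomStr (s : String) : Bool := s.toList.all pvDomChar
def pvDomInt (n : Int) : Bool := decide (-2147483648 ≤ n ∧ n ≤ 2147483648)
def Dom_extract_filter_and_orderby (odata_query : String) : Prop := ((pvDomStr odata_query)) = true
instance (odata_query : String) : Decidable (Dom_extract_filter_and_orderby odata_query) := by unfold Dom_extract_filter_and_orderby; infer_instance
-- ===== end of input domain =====

-- B replaces A's two-prefix conditional-assignment pass by building a dict of all
-- key/value query parameters (partition each part at its first '=') and looking up
-- "$filter" and "$orderby"; same O(n) cost, proved equal on all inputs.


-- ===== PORT A =====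
-- A's loop: for part in odata_query.split("&"), conditionally reassign f / o.
def extract_filter_and_orderby (odata_query : String) : Option String × Option String :=
  let fo := (PySem.Chars.splitOn odata_query.toList ['&']).foldl
    (fun (fo : Option (List Char) × Option (List Char)) part =>
      if PySem.Chars.startswith part "$filter=".toList then
        (some (PySem.Chars.slice part (some 8) none), fo.2)
      else if PySem.Chars.startswith part "$orderby=".toList then
        (fo.1, some (PySem.Chars.slice part (some 9) none))
      else fo) (none, none)
  (fo.1.map String.ofList, fo.2.map String.ofList)

-- ===== PORT B =====
-- hand port of str.partition("="): (before, sep-found?, after); exact for a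
-- one-character separator: scans to the first '=' and splits there.
def pvPartitionEq : List Char → List Char × Bool × List Char
  | [] => ([], false, [])
  | c :: rest =>
    if c = '=' then ([], true, rest)
    else
      let r := pvPartitionEq rest
      (c :: r.1, r.2.1, r.2.2)

def extract_filter_and_orderby_alt (odata_query : String) : Option String × Option String :=
  let params := (PySem.Chars.splitOn odata_query.toList ['&']).foldl
    (fun (d : PySem.Dict (List Char) (List Char)) part =>
      let kv := pvPartitionEq part
      if kv.2.1 then d.insert kv.1 kv.2.2 else d)
    PySem.Dict.empty
  ((params.get? "$filter".toList).map String.ofList,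
   (params.get? "$orderby".toList).map String.ofList)

-- ===== PRECONDITION & SPEC =====
def Spec_extract_filter_and_orderby (odata_query : String) (out : Option String × Option String) : Prop := out = extract_filter_and_orderby_alt odata_query
instance (odata_query : String) (out : Option String × Option String) : Decidable (Spec_extract_filter_and_orderby odata_query out) := by unfold Spec_extract_filter_and_orderby; infer_instance

-- ===== CLAIM (what is proved, stated in full; the proofs are below) =====
def Claim_equal_extract_filter_and_orderby : Prop := ∀ (odata_query : String), Dom_extract_filter_and_orderby odata_query → Spec_extract_filter_and_orderby odata_query (extract_filter_and_orderby odata_query)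

-- ===== LEMMAS AND PROOFS =====

-- partition of a part that starts with "$filter="
theorem pvPartitionEq_filter (rest : List Char) :
    pvPartitionEq ("$filter=".toList ++ rest) = ("$filter".toList, true, rest) := by
  rw [show "$filter=".toList = ['$','f','i','l','t','e','r','='] from by decide,
    show "$filter".toList = ['$','f','i','l','t','e','r'] from by decide]
  simp [pvPartitionEq]

theorem pvPartitionEq_orderby (rest : List Char) :
    pvPartitionEq ("$orderby=".toList ++ rest) = ("$orderby".toList, true, rest) := by
  rw [show "$orderby=".toList = ['$','o','r','d','e','r','b','y','='] from by decide,
    show "$orderby".toList = ['$','o','r','d','e','r','b','y'] from by decide]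
  simp [pvPartitionEq]

-- when '=' is found, the part is key ++ '=' ++ value
theorem pvPartitionEq_true (cs : List Char) (h : (pvPartitionEq cs).2.1 = true) :
    cs = (pvPartitionEq cs).1 ++ '=' :: (pvPartitionEq cs).2.2 := by
  induction cs with
  | nil => simp [pvPartitionEq] at h
  | cons c rest ih =>
    by_cases hc : c = '='
    · simp [pvPartitionEq, hc]
    · simp only [pvPartitionEq, if_neg hc] at h ⊢
      simpa using ih h

-- the loop invariant: A's pair is exactly B's dict looked up at the two keys
theorem pv_fold_eq (parts : List (List Char)) (f o : Option (List Char))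
    (d : PySem.Dict (List Char) (List Char))
    (hf : f = d.get? "$filter".toList) (ho : o = d.get? "$orderby".toList) :
    (parts.foldl
      (fun (fo : Option (List Char) × Option (List Char)) part =>
        if PySem.Chars.startswith part "$filter=".toList then
          (some (PySem.Chars.slice part (some 8) none), fo.2)
        else if PySem.Chars.startswith part "$orderby=".toList then
          (fo.1, some (PySem.Chars.slice part (some 9) none))
        else fo) (f, o)) =
    (((parts.foldl
        (fun (d : PySem.Dict (List Char) (List Char)) part =>
          let kv := pvPartitionEq part
          if kv.2.1 then d.insert kv.1 kv.2.2 else d) d)).get? "$filter".toList,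
     ((parts.foldl
        (fun (d : PySem.Dict (List Char) (List Char)) part =>
          let kv := pvPartitionEq part
          if kv.2.1 then d.insert kv.1 kv.2.2 else d) d)).get? "$orderby".toList) := by
  induction parts generalizing f o d with
  | nil => simp [hf, ho]
  | cons p ps ih =>
    simp only [List.foldl_cons]
    by_cases hF : PySem.Chars.startswith p "$filter=".toList
    · obtain ⟨rest, hrest⟩ := List.isPrefixOf_iff_prefix.mp hF
      subst hrest
      rw [if_pos hF]
      apply ih
      · rw [pvPartitionEq_filter]
        simp only [if_pos]
        rw [PySem.Dict.get?_insert_self]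
        rw [show (some (8:Int)) = some (("$filter=".toList.length : Nat) : Int) from by decide]
        rw [show PySem.Chars.slice ("$filter=".toList ++ rest)
              (some ("$filter=".toList.length : Int)) = rest from by
            rw [show PySem.Chars.slice ("$filter=".toList ++ rest)
                (some ("$filter=".toList.length : Int)) =
                PySem.List.slice ("$filter=".toList ++ rest)
                (some ("$filter=".toList.length : Int)) from rfl,
              PySem.List.slice_from_natCast, List.drop_left]]
      · rw [pvPartitionEq_filter]
        simp only [if_pos]
        rw [PySem.Dict.get?_insert_of_ne _ _ (by decide), ho]
    · by_cases hO : PySem.Chars.startswith p "$orderby=".toList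
      · obtain ⟨rest, hrest⟩ := List.isPrefixOf_iff_prefix.mp hO
        subst hrest
        rw [if_neg hF, if_pos hO]
        apply ih
        · rw [pvPartitionEq_orderby]
          simp only [if_pos]
          rw [PySem.Dict.get?_insert_of_ne _ _ (by decide), hf]
        · rw [pvPartitionEq_orderby]
          simp only [if_pos]
          rw [PySem.Dict.get?_insert_self]
          rw [show (some (9:Int)) = some (("$orderby=".toList.length : Nat) : Int) from by decide]
          rw [show PySem.Chars.slice ("$orderby=".toList ++ rest)
                (some ("$orderby=".toList.length : Int)) = rest from by
              rw [show PySem.Chars.slice ("$orderby=".toList ++ rest)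
                  (some ("$orderby=".toList.length : Int)) =
                  PySem.List.slice ("$orderby=".toList ++ rest)
                  (some ("$orderby=".toList.length : Int)) from rfl,
                PySem.List.slice_from_natCast, List.drop_left]]
      · rw [if_neg hF, if_neg hO]
        by_cases hs : (pvPartitionEq p).2.1
        · -- the key cannot be "$filter" or "$orderby", else p would have that prefix
          have hsplit := pvPartitionEq_true p hs
          have hkf : (pvPartitionEq p).1 ≠ "$filter".toList := by
            intro hk
            apply hF
            rw [hsplit, hk, show '=' :: (pvPartitionEq p).2.2 = ['='] ++ (pvPartitionEq p).2.2 from rfl,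
              ← List.append_assoc,
              show "$filter".toList ++ ['='] = "$filter=".toList from by decide]
            exact List.isPrefixOf_iff_prefix.mpr (List.prefix_append _ _)
          have hko : (pvPartitionEq p).1 ≠ "$orderby".toList := by
            intro hk
            apply hO
            rw [hsplit, hk, show '=' :: (pvPartitionEq p).2.2 = ['='] ++ (pvPartitionEq p).2.2 from rfl,
              ← List.append_assoc,
              show "$orderby".toList ++ ['='] = "$orderby=".toList from by decide]
            exact List.isPrefixOf_iff_prefix.mpr (List.prefix_append _ _)
          apply ih
          · simp only [if_pos hs]
            rw [PySem.Dict.get?_insert_of_ne _ _ (fun h => hkf h.symm), hf]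
          · simp only [if_pos hs]
            rw [PySem.Dict.get?_insert_of_ne _ _ (fun h => hko h.symm), ho]
        · simp only [if_neg hs]
          exact ih f o d hf ho

-- ===== VERDICT (by name: the statement is the Claim_ definition above) =====
theorem extract_filter_and_orderby_spec : Claim_equal_extract_filter_and_orderby := by
  intro q _
  unfold Spec_extract_filter_and_orderby extract_filter_and_orderby extract_filter_and_orderby_alt
  rw [pv_fold_eq _ none none PySem.Dict.empty (by simp) (by simp)]
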